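-- pv_equiv track=rewrite | github.com/ehddn5252/Algorithm | personalWorkspace/test/line/test.py | satisfied_name_condition
-- ===== SOURCE A (Python) =====
-- def satisfied_name_condition(name,min_value,max_value):
--     ret = True
--     for char in name:
--         if min_value<=ord(char) and ord(char)<=max_value:
--             continue
--         else:
--             return False
--     return ret
-- ===== SOURCE B (Python) =====
-- def satisfied_name_condition(name, min_value, max_value):
--     if not name:
--         return True
--     ords = [ord(c) for c in name]
--     return min_value <= min(ords) and max(ords) <= max_value
-- ===== Notes on version B (the rewrite author's own statement) =====
-- stated objective: alternative
-- what changed: B maps the string to its ordinals once and aggregates running min/max extremes (with an explicit empty-string case), instead of A's per-character range test with early return.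
import Mathlib
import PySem

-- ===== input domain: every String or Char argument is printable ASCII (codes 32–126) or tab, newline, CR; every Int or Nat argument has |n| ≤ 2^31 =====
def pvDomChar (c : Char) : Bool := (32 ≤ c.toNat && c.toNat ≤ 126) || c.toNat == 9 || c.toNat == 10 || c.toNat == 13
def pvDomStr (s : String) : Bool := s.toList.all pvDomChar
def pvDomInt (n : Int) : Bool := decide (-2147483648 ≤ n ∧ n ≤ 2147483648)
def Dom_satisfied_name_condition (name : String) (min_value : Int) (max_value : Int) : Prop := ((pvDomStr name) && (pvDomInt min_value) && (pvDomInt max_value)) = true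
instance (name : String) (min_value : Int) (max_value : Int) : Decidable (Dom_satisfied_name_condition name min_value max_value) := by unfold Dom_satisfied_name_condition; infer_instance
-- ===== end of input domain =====

-- B replaces A's per-character range test with early return by a single pass that
-- aggregates the min and max ordinal of the whole name (objective: alternative).

-- ===== PORT A =====
-- A's for-loop with early `return False`: structural recursion over the characters,
-- returning false at the first out-of-range character, else true (the `ret` value).
def satisfiedLoopA (min_value max_value : Int) : List Char → Bool
  | [] => true
  | c :: cs =>
    if min_value ≤ (c.toNat : Int) ∧ (c.toNat : Int) ≤ max_value then
      satisfiedLoopA min_value max_value cs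
    else
      false

def satisfied_name_condition (name : String) (min_value : Int) (max_value : Int) : Bool :=
  satisfiedLoopA min_value max_value name.toList

-- ===== PORT B =====
def satisfied_name_condition_alt (name : String) (min_value : Int) (max_value : Int) : Bool :=
  match name.toList.map (fun c => (c.toNat : Int)) with
  | [] => true
  | o :: os =>
    decide (min_value ≤ os.foldl min o) && decide (os.foldl max o ≤ max_value)

-- ===== PRECONDITION & SPEC =====
def Spec_satisfied_name_condition (name : String) (min_value : Int) (max_value : Int) (out : Bool) : Prop := out = satisfied_name_condition_alt name min_value max_value
instance (name : String) (min_value : Int) (max_value : Int) (out : Bool) : Decidable (Spec_satisfied_name_condition name min_value max_value out) := by unfold Spec_satisfied_name_condition; infer_instance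

-- ===== CLAIM (what is proved, stated in full; the proofs are below) =====
def Claim_equal_satisfied_name_condition : Prop := ∀ (name : String) (min_value : Int) (max_value : Int), Dom_satisfied_name_condition name min_value max_value → Spec_satisfied_name_condition name min_value max_value (satisfied_name_condition name min_value max_value)

-- ===== LEMMAS AND PROOFS =====

theorem le_foldl_min_iff (mn : Int) (l : List Int) : ∀ o : Int,
    (mn ≤ l.foldl min o ↔ mn ≤ o ∧ ∀ x ∈ l, mn ≤ x) := by
  induction l with
  | nil => intro o; simp
  | cons a t ih =>
    intro o
    simp only [List.foldl_cons, ih, le_min_iff, List.mem_cons, forall_eq_or_imp]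
    tauto

theorem foldl_max_le_iff (mx : Int) (l : List Int) : ∀ o : Int,
    (l.foldl max o ≤ mx ↔ o ≤ mx ∧ ∀ x ∈ l, x ≤ mx) := by
  induction l with
  | nil => intro o; simp
  | cons a t ih =>
    intro o
    simp only [List.foldl_cons, ih, max_le_iff, List.mem_cons, forall_eq_or_imp]
    tauto

theorem loopA_eq_true_iff (mn mx : Int) (l : List Char) :
    satisfiedLoopA mn mx l = true ↔ ∀ c ∈ l, mn ≤ (c.toNat : Int) ∧ (c.toNat : Int) ≤ mx := by
  induction l with
  | nil => simp [satisfiedLoopA]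
  | cons c cs ih =>
    simp only [satisfiedLoopA, List.mem_cons, forall_eq_or_imp]
    split_ifs with h
    · simp only [ih]
      exact ⟨fun h2 => ⟨h, h2⟩, fun h2 => h2.2⟩
    · simp only [false_iff]
      exact fun h2 => h h2.1

-- ===== VERDICT (by name: the statement is the Claim_ definition above) =====
theorem satisfied_name_condition_spec : Claim_equal_satisfied_name_condition := by
  intro name mn mx _
  unfold Spec_satisfied_name_condition satisfied_name_condition satisfied_name_condition_alt
  cases hl : name.toList with
  | nil => simp [satisfiedLoopA]
  | cons c cs =>
    simp only [List.map_cons]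
    rw [Bool.eq_iff_iff, loopA_eq_true_iff, Bool.and_eq_true, decide_eq_true_iff,
      decide_eq_true_iff, le_foldl_min_iff, foldl_max_le_iff]
    constructor
    · intro h
      refine ⟨⟨(h c (List.mem_cons_self ..)).1, ?_⟩, (h c (List.mem_cons_self ..)).2, ?_⟩ <;>
        · intro x hx
          rcases List.mem_map.mp hx with ⟨d, hd, rfl⟩
          first
            | exact (h d (List.mem_cons_of_mem _ hd)).1
            | exact (h d (List.mem_cons_of_mem _ hd)).2
    · rintro ⟨⟨h1, h2⟩, h3, h4⟩ d hd
      rcases List.mem_cons.mp hd with rfl | hd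
      · exact ⟨h1, h3⟩
      · exact ⟨h2 _ (List.mem_map_of_mem hd), h4 _ (List.mem_map_of_mem hd)⟩
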